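-- pv_equiv track=rewrite | github.com/mateogon/AEM-Tarea1 | gestor_tareas.py | cumple_presupuesto
-- ===== SOURCE A (Python) =====
-- def obtener_tareas_proyecto(proyecto, tareas_por_proyecto):
--     # Retorna las tareas asociadas a un proyecto específico
--     tareas = tareas_por_proyecto[proyecto]
--     return tareas
--
-- def calcular_costo_tareas(tareas_totales, costos):
--     # Calcula el costo total basado en las tareas seleccionadas
--     costo = 0
--     for tarea in range(len(tareas_totales)):
--         if tareas_totales[tarea]:
--             costo += costos[tarea]
--     return costo
--
-- def cumple_presupuesto(proyectos_seleccionados, presupuesto_max, tareas_por_proyecto, costos):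
--     tareas_seleccionadas = [0 for _ in range(len(costos))]
--
--     for proyecto in proyectos_seleccionados:
--         tareas_del_proyecto = obtener_tareas_proyecto(proyecto, tareas_por_proyecto)
--         for i, tarea_seleccionada in enumerate(tareas_del_proyecto):
--             if tarea_seleccionada:
--                 tareas_seleccionadas[i] = 1
--
--     costo_total = calcular_costo_tareas(tareas_seleccionadas, costos)
--
--     return costo_total <= presupuesto_max, costo_total
-- ===== SOURCE B (Python) =====
-- def cumple_presupuesto(proyectos_seleccionados, presupuesto_max, tareas_por_proyecto, costos):
--     # Transposed traversal: no union/flag structure is built; for each cost index j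
--     # we ask directly whether any selected project's task list is truthy at j.
--     filas = [tareas_por_proyecto[p] for p in proyectos_seleccionados]
--     costo_total = 0
--     for j, costo in enumerate(costos):
--         if any(j < len(fila) and fila[j] for fila in filas):
--             costo_total += costo
--     return costo_total <= presupuesto_max, costo_total
-- ===== Notes on version B (the rewrite author's own statement) =====
-- stated objective: alternative
-- what changed: B transposes the traversal: instead of A's two-phase union (build a dense 0/1 flag list across all projects, then rescan costos against the flags), B builds no union structure at all and makes one pass over costos, deciding each index j directly with a short-circuiting any() over the selected rows.
import Mathlib
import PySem

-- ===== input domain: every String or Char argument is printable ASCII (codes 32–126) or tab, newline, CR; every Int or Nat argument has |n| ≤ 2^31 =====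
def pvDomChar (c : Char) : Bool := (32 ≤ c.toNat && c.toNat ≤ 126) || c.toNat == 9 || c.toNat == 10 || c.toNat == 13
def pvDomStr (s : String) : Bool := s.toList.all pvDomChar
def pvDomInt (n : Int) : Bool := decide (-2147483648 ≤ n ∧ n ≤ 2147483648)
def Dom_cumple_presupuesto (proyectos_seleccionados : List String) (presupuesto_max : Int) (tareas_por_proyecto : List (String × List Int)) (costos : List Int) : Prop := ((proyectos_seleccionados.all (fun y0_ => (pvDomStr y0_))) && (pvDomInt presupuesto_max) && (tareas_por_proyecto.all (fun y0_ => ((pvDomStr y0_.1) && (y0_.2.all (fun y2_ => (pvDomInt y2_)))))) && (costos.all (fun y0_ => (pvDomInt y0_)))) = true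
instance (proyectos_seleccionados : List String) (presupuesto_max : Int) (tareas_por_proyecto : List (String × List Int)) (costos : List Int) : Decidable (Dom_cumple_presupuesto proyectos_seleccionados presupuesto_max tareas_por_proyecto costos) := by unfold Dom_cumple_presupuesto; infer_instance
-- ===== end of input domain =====

-- B transposes the traversal: no union/flag structure, one pass over costos with a
-- short-circuiting any() over the selected rows per index (objective: alternative).

-- ===== PORT A =====
-- dict lookup tareas_por_proyecto[proyecto]; KeyError (missing key) is excluded by Pre_
def obtener_tareas_proyecto (proyecto : String) (tareas_por_proyecto : List (String × List Int)) : List Int :=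
  ((PySem.Dict.mk tareas_por_proyecto).get? proyecto).getD []

-- for tarea in range(len(tareas_totales)): if tareas_totales[tarea]: costo += costos[tarea]
-- (costos[tarea] is in range whenever the flag is set, under Pre_; pyGetD is exact there)
def calcular_costo_tareas (tareas_totales : List Int) (costos : List Int) : Int :=
  (PySem.List.pyRange 0 (tareas_totales.length : Int) 1).foldl
    (fun costo tarea =>
      if PySem.List.pyGetD tareas_totales tarea 0 ≠ 0 then
        costo + PySem.List.pyGetD costos tarea 0
      else costo) 0

def cumple_presupuesto (proyectos_seleccionados : List String) (presupuesto_max : Int) (tareas_por_proyecto : List (String × List Int)) (costos : List Int) : Bool × Int :=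
  let init : List Int := List.replicate costos.length 0
  let tareas_seleccionadas : List Int := proyectos_seleccionados.foldl
    (fun ts proyecto =>
      (PySem.List.enumerate (obtener_tareas_proyecto proyecto tareas_por_proyecto) 0).foldl
        (fun ts p =>
          -- tareas_seleccionadas[i] = 1; IndexError (i ≥ len(costos)) is excluded by Pre_;
          -- the enumerate index is ≥ 0, so .toNat is exact
          if p.2 ≠ 0 then ts.set p.1.toNat 1 else ts) ts)
    init
  let costo_total := calcular_costo_tareas tareas_seleccionadas costos
  (decide (costo_total ≤ presupuesto_max), costo_total)

-- ===== PORT B =====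
def cumple_presupuesto_alt (proyectos_seleccionados : List String) (presupuesto_max : Int) (tareas_por_proyecto : List (String × List Int)) (costos : List Int) : Bool × Int :=
  -- filas = [tareas_por_proyecto[p] for p in proyectos_seleccionados]; KeyError excluded by Pre_
  let filas : List (List Int) := proyectos_seleccionados.map
    (fun p => ((PySem.Dict.mk tareas_por_proyecto).get? p).getD [])
  -- for j, costo in enumerate(costos): if any(j < len(fila) and fila[j] for fila in filas)
  -- (fila[j] is guarded by j < len(fila), so pyGetD is exact; List.any short-circuits like any())
  let costo_total : Int := (PySem.List.enumerate costos 0).foldl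
    (fun c q =>
      if filas.any (fun fila =>
          decide (q.1 < (fila.length : Int)) && decide (PySem.List.pyGetD fila q.1 0 ≠ 0)) then
        c + q.2
      else c) 0
  (decide (costo_total ≤ presupuesto_max), costo_total)

-- ===== PRECONDITION & SPEC =====
-- Pre_ excludes exactly the inputs where A raises: a selected project missing from the
-- dict (KeyError) or a selected truthy task index ≥ len(costos) (IndexError).
def Pre_cumple_presupuesto (proyectos_seleccionados : List String) (presupuesto_max : Int) (tareas_por_proyecto : List (String × List Int)) (costos : List Int) : Prop :=
  ∀ proyecto ∈ proyectos_seleccionados,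
    ((PySem.Dict.mk tareas_por_proyecto).get? proyecto).isSome ∧
    ∀ p ∈ PySem.List.enumerate (((PySem.Dict.mk tareas_por_proyecto).get? proyecto).getD []) 0,
      p.2 ≠ 0 → p.1 < (costos.length : Int)
instance (proyectos_seleccionados : List String) (presupuesto_max : Int) (tareas_por_proyecto : List (String × List Int)) (costos : List Int) : Decidable (Pre_cumple_presupuesto proyectos_seleccionados presupuesto_max tareas_por_proyecto costos) := by unfold Pre_cumple_presupuesto; infer_instance

def pvWitness_cumple_presupuesto : List String × Int × (List (String × List Int)) × List Int :=
  (["p", "q"], 7, [("p", [1, 0]), ("q", [0, 1, 0])], [3, 4, 5])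

def Spec_cumple_presupuesto (proyectos_seleccionados : List String) (presupuesto_max : Int) (tareas_por_proyecto : List (String × List Int)) (costos : List Int) (out : Bool × Int) : Prop := out = cumple_presupuesto_alt proyectos_seleccionados presupuesto_max tareas_por_proyecto costos
instance (proyectos_seleccionados : List String) (presupuesto_max : Int) (tareas_por_proyecto : List (String × List Int)) (costos : List Int) (out : Bool × Int) : Decidable (Spec_cumple_presupuesto proyectos_seleccionados presupuesto_max tareas_por_proyecto costos out) := by unfold Spec_cumple_presupuesto; infer_instance

-- ===== CLAIM (what is proved, stated in full; the proofs are below) =====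
def Claim_equal_cumple_presupuesto : Prop := ∀ (proyectos_seleccionados : List String) (presupuesto_max : Int) (tareas_por_proyecto : List (String × List Int)) (costos : List Int), Dom_cumple_presupuesto proyectos_seleccionados presupuesto_max tareas_por_proyecto costos → Pre_cumple_presupuesto proyectos_seleccionados presupuesto_max tareas_por_proyecto costos → Spec_cumple_presupuesto proyectos_seleccionados presupuesto_max tareas_por_proyecto costos (cumple_presupuesto proyectos_seleccionados presupuesto_max tareas_por_proyecto costos)

-- ===== LEMMAS AND PROOFS =====

-- A's inner loop over one enumerated row: length is preserved and the flag at j is set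
-- exactly when it was set before or the row has a truthy entry indexed j.
theorem pvInner (l : List Int) : ∀ (k : Int) (ts : List Int), 0 ≤ k →
    (∀ p ∈ PySem.List.enumerate l k, p.2 ≠ 0 → p.1 < (ts.length : Int)) →
    ((PySem.List.enumerate l k).foldl (fun ts p => if p.2 ≠ 0 then ts.set p.1.toNat 1 else ts) ts).length = ts.length ∧
    ∀ j : Nat, (((PySem.List.enumerate l k).foldl (fun ts p => if p.2 ≠ 0 then ts.set p.1.toNat 1 else ts) ts).getD j 0 ≠ 0 ↔
      (ts.getD j 0 ≠ 0 ∨ ∃ p ∈ PySem.List.enumerate l k, p.1 = (j : Int) ∧ p.2 ≠ 0)) := by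
  induction l with
  | nil => intro k ts _ _; simp [PySem.List.enumerate_nil]
  | cons x xs ih =>
    intro k ts hk hb
    rw [PySem.List.enumerate_cons]
    simp only [List.foldl_cons]
    by_cases hx : x ≠ 0
    · rw [show (if ((k, x).2 : Int) ≠ 0 then ts.set (k, x).1.toNat 1 else ts) = ts.set k.toNat 1 from if_pos hx]
      have hkts : k < (ts.length : Int) := hb (k, x) (by rw [PySem.List.enumerate_cons]; exact List.mem_cons_self) hx
      have hlen' : (ts.set k.toNat 1).length = ts.length := by simp
      obtain ⟨hl, hm⟩ := ih (k + 1) (ts.set k.toNat 1) (by omega)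
        (fun p hp hpne => by
          rw [hlen']
          exact hb p (by rw [PySem.List.enumerate_cons]; exact List.mem_cons_of_mem _ hp) hpne)
      refine ⟨by rw [hl, hlen'], fun j => ?_⟩
      rw [hm j]
      have hset : (ts.set k.toNat 1).getD j 0 ≠ 0 ↔ (j = k.toNat ∨ ts.getD j 0 ≠ 0) := by
        by_cases hj : j = k.toNat
        · subst hj
          rw [List.getD_eq_getElem?_getD, List.getElem?_set_self (by omega)]
          simp
        · rw [List.getD_eq_getElem?_getD, List.getElem?_set_ne (by omega),
            ← List.getD_eq_getElem?_getD]
          simp [hj]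
      rw [hset]
      constructor
      · rintro (⟨hj | hts⟩ | ⟨p, hp, hpj, hpne⟩)
        · exact Or.inr ⟨(k, x), List.mem_cons_self, by simp [hj, hx]; omega⟩
        · exact Or.inl hts
        · exact Or.inr ⟨p, by simp [hp], hpj, hpne⟩
      · rintro (hts | ⟨p, hp, hpj, hpne⟩)
        · exact Or.inl (Or.inr hts)
        · rcases List.mem_cons.mp hp with rfl | hp'
          · simp only at hpj; exact Or.inl (Or.inl (by omega))
          · exact Or.inr ⟨p, hp', hpj, hpne⟩
    · rw [show (if ((k, x).2 : Int) ≠ 0 then ts.set (k, x).1.toNat 1 else ts) = ts from if_neg hx]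
      obtain ⟨hl, hm⟩ := ih (k + 1) ts (by omega)
        (fun p hp hpne => hb p (by simp [hp]) hpne)
      refine ⟨hl, fun j => ?_⟩
      rw [hm j]
      constructor
      · rintro (hts | ⟨p, hp, hpj, hpne⟩)
        · exact Or.inl hts
        · exact Or.inr ⟨p, by simp [hp], hpj, hpne⟩
      · rintro (hts | ⟨p, hp, hpj, hpne⟩)
        · exact Or.inl hts
        · rcases List.mem_cons.mp hp with rfl | hp'
          · exact absurd hpne (by simpa using not_not.mp hx)
          · exact Or.inr ⟨p, hp', hpj, hpne⟩

-- A's outer loop over the selected projects, accumulated form of the same characterisation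
theorem pvOuter (tpp : List (String × List Int)) :
    ∀ (ps : List String) (ts : List Int),
    (∀ proyecto ∈ ps, ∀ p ∈ PySem.List.enumerate (obtener_tareas_proyecto proyecto tpp) 0,
      p.2 ≠ 0 → p.1 < (ts.length : Int)) →
    (ps.foldl (fun ts proyecto =>
      (PySem.List.enumerate (obtener_tareas_proyecto proyecto tpp) 0).foldl
        (fun ts p => if p.2 ≠ 0 then ts.set p.1.toNat 1 else ts) ts) ts).length = ts.length ∧
    ∀ j : Nat, ((ps.foldl (fun ts proyecto =>
      (PySem.List.enumerate (obtener_tareas_proyecto proyecto tpp) 0).foldl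
        (fun ts p => if p.2 ≠ 0 then ts.set p.1.toNat 1 else ts) ts) ts).getD j 0 ≠ 0 ↔
      (ts.getD j 0 ≠ 0 ∨ ∃ proyecto ∈ ps,
        ∃ p ∈ PySem.List.enumerate (obtener_tareas_proyecto proyecto tpp) 0,
          p.1 = (j : Int) ∧ p.2 ≠ 0)) := by
  intro ps
  induction ps with
  | nil => intro ts _; simp
  | cons q qs ih =>
    intro ts hb
    simp only [List.foldl_cons]
    obtain ⟨hl1, hm1⟩ := pvInner (obtener_tareas_proyecto q tpp) 0 ts le_rfl
      (hb q (List.mem_cons_self))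
    obtain ⟨hl2, hm2⟩ := ih _ (fun proyecto hp p hpp hpne => by
      rw [hl1]
      exact hb proyecto (List.mem_cons_of_mem _ hp) p hpp hpne)
    refine ⟨by rw [hl2, hl1], fun j => ?_⟩
    rw [hm2 j, hm1 j]
    constructor
    · rintro (⟨hts | hq⟩ | ⟨proy, hproy, hrest⟩)
      · exact Or.inl hts
      · exact Or.inr ⟨q, List.mem_cons_self, hq⟩
      · exact Or.inr ⟨proy, List.mem_cons_of_mem _ hproy, hrest⟩
    · rintro (hts | ⟨proy, hproy, hrest⟩)
      · exact Or.inl (Or.inl hts)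
      · rcases List.mem_cons.mp hproy with rfl | hproy'
        · exact Or.inl (Or.inr hrest)
        · exact Or.inr ⟨proy, hproy', hrest⟩

theorem pvReplicate_getD (n j : Nat) : (List.replicate n (0 : Int)).getD j 0 = 0 := by
  rcases Nat.lt_or_ge j n with h | h
  · rw [List.getD_eq_getElem?_getD, List.getElem?_replicate]; simp [h]
  · rw [List.getD_eq_getElem?_getD, List.getElem?_eq_none (by simpa using h)]; rfl

-- ===== VERDICT =====
theorem cumple_presupuesto_spec : Claim_equal_cumple_presupuesto := by
  intro ps pm tpp costos _ hpre
  unfold Spec_cumple_presupuesto cumple_presupuesto cumple_presupuesto_alt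
  set n := costos.length with hn
  suffices h : calcular_costo_tareas
      (ps.foldl (fun ts proyecto =>
        (PySem.List.enumerate (obtener_tareas_proyecto proyecto tpp) 0).foldl
          (fun ts p => if p.2 ≠ 0 then ts.set p.1.toNat 1 else ts) ts)
        (List.replicate n (0 : Int))) costos
    = (PySem.List.enumerate costos 0).foldl
        (fun c q =>
          if (ps.map (fun p => ((PySem.Dict.mk tpp).get? p).getD [])).any (fun fila =>
              decide (q.1 < (fila.length : Int)) && decide (PySem.List.pyGetD fila q.1 0 ≠ 0)) then
            c + q.2
          else c) 0 by
    simp only [h]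
  obtain ⟨hlen, hmem⟩ := pvOuter tpp ps (List.replicate n (0 : Int))
    (fun proyecto hp => by
      rw [List.length_replicate]
      exact (hpre proyecto hp).2)
  set TS := ps.foldl (fun ts proyecto =>
      (PySem.List.enumerate (obtener_tareas_proyecto proyecto tpp) 0).foldl
        (fun ts p => if p.2 ≠ 0 then ts.set p.1.toNat 1 else ts) ts)
      (List.replicate n (0 : Int)) with hTS
  rw [List.length_replicate] at hlen
  -- rewrite B's fold over enumerate as a fold over the index range
  rw [PySem.List.enumerate_eq_map_pyRange (d := 0), List.foldl_map]
  unfold calcular_costo_tareas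
  rw [hlen]
  apply PySem.List.foldl_congr_mem
  intro acc j hj
  have hjr : 0 ≤ j ∧ j < (n : Int) := by
    have := PySem.List.mem_pyRange_one.mp hj
    omega
  have hcond : (PySem.List.pyGetD TS j 0 ≠ 0) ↔
      ((ps.map (fun p => ((PySem.Dict.mk tpp).get? p).getD [])).any (fun fila =>
        decide (j < (fila.length : Int)) && decide (PySem.List.pyGetD fila j 0 ≠ 0)) = true) := by
    rw [PySem.List.pyGetD_of_nonneg _ _ hjr.1]
    rw [hmem j.toNat, pvReplicate_getD]
    simp only [ne_eq, not_true_eq_false, false_or]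
    rw [List.any_map, List.any_eq_true]
    constructor
    · rintro ⟨proy, hproy, p, hp, hpj, hpne⟩
      refine ⟨proy, hproy, ?_⟩
      obtain ⟨k, hk, rfl⟩ := (PySem.List.mem_enumerate_iff _ _ _).mp hp
      simp only [zero_add] at hpj hpne
      unfold obtener_tareas_proyecto at hk hpne
      have hjk : j = (k : Int) := by omega
      subst hjk
      simp only [Function.comp_apply, Bool.and_eq_true, decide_eq_true_eq]
      rw [PySem.List.pyGetD_of_nonneg _ _ (by omega)]
      refine ⟨by exact_mod_cast hk, ?_⟩
      rw [show ((k : Int)).toNat = k from by omega, List.getD_eq_getElem?_getD,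
        List.getElem?_eq_getElem hk]
      simpa using hpne
    · rintro ⟨proy, hproy, hfil⟩
      simp only [Function.comp_apply, Bool.and_eq_true, decide_eq_true_eq] at hfil
      obtain ⟨hjl, hne⟩ := hfil
      have hjlt : j.toNat < (((PySem.Dict.mk tpp).get? proy).getD []).length := by omega
      refine ⟨proy, hproy, (0 + (j.toNat : Int), (((PySem.Dict.mk tpp).get? proy).getD [])[j.toNat]), ?_, by simp, ?_⟩
      · unfold obtener_tareas_proyecto
        exact (PySem.List.mem_enumerate_iff _ _ _).mpr ⟨j.toNat, hjlt, rfl⟩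
      · rw [PySem.List.pyGetD_of_nonneg _ _ hjr.1] at hne
        rw [List.getD_eq_getElem?_getD, List.getElem?_eq_getElem hjlt] at hne
        simpa using hne
  by_cases hc : PySem.List.pyGetD TS j 0 ≠ 0
  · rw [if_pos hc, if_pos (hcond.mp hc)]
  · rw [if_neg hc, if_neg (by rw [← hcond] at *; simpa using hc)]
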